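-- pv_equiv track=rewrite | github.com/Anupama22here/Multi-Script-OCR-AI | backend/main.py | line_print
-- ===== SOURCE A (Python) =====
-- def line_print(prediction):
--     """Format OCR prediction with line breaks"""
--     current_line = 1
--     extracted_text = ""
--     for text in prediction:
--         pred_text = text[0]
--         line_details = text[2][1]
--
--         if line_details != current_line:
--             extracted_text += "\n" + pred_text + " "
--             current_line = line_details
--         else:
--             extracted_text += pred_text + " "
--     return extracted_text.strip()
-- ===== SOURCE B (Python) =====
-- def line_print(prediction):
--     """Format OCR prediction with line breaks"""
--     groups = []  # list of (line_number, [words]) for consecutive runs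
--     for text in prediction:
--         key = text[2][1]
--         if groups and groups[-1][0] == key:
--             groups[-1][1].append(text[0])
--         else:
--             groups.append((key, [text[0]]))
--     return " \n".join(" ".join(words) for _, words in groups).strip()
-- ===== Notes on version B (the rewrite author's own statement) =====
-- stated objective: idiomatic
-- what changed: B groups the predictions into consecutive runs sharing a line number, joins each run's words with ' ' and the lines with ' \n', then strips, instead of A's stateful string accumulation with a current_line sentinel.
import Mathlib
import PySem

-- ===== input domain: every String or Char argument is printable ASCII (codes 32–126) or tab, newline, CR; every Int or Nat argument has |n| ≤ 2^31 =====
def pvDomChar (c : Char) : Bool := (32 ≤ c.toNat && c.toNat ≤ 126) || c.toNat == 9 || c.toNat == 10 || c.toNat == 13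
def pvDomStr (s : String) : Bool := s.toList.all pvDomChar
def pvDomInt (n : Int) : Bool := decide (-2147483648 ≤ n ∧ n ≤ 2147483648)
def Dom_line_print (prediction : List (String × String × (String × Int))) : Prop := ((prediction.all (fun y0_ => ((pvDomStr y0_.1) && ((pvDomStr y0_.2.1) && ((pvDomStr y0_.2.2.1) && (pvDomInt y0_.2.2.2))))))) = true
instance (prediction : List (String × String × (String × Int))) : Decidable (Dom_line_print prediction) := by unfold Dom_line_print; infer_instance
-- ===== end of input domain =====

-- B replaces A's stateful string accumulation (current_line sentinel, "\n"-prefixed appends)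
-- by grouping the predictions into consecutive same-line runs and joining words/lines; idiomatic, same cost.

-- ===== PORT A =====
-- loop body of A: state = (current_line, extracted_text)
def lpStep (s : Int × String) (text : String × String × (String × Int)) : Int × String :=
  let pred_text := text.1
  let line_details := text.2.2.2
  if line_details ≠ s.1 then (line_details, s.2 ++ ("\n" ++ pred_text ++ " "))
  else (s.1, s.2 ++ (pred_text ++ " "))

def line_print (prediction : List (String × String × (String × Int))) : String :=
  PySem.Str.strip (prediction.foldl lpStep (1, "")).2

-- ===== PORT B =====
-- loop body of B: groups = list of (line number, words) for consecutive runs; append to the last run or open a new one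
def lpGroupStep (groups : List (Int × List String)) (text : String × String × (String × Int)) : List (Int × List String) :=
  match groups.getLast? with
  | some (k, ws) =>
      if k = text.2.2.2 then groups.dropLast ++ [(k, ws ++ [text.1])]
      else groups ++ [(text.2.2.2, [text.1])]
  | none => [(text.2.2.2, [text.1])]

def line_print_alt (prediction : List (String × String × (String × Int))) : String :=
  let groups := prediction.foldl lpGroupStep []
  PySem.Str.strip (PySem.Str.join " \n" (groups.map (fun g => PySem.Str.join " " g.2)))

-- ===== PRECONDITION & SPEC =====
def Spec_line_print (prediction : List (String × String × (String × Int))) (out : String) : Prop := out = line_print_alt prediction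
instance (prediction : List (String × String × (String × Int))) (out : String) : Decidable (Spec_line_print prediction out) := by unfold Spec_line_print; infer_instance

-- ===== CLAIM (what is proved, stated in full; the proofs are below) =====
def Claim_equal_line_print : Prop := ∀ (prediction : List (String × String × (String × Int))), Dom_line_print prediction → Spec_line_print prediction (line_print prediction)

-- ===== LEMMAS AND PROOFS =====

theorem lpStep_eq (s : Int × String) (t : String × String × (String × Int)) (h : t.2.2.2 = s.1) :
    lpStep s t = (s.1, s.2 ++ (t.1 ++ " ")) := by simp [lpStep, h]

theorem lpStep_ne (s : Int × String) (t : String × String × (String × Int)) (h : t.2.2.2 ≠ s.1) :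
    lpStep s t = (t.2.2.2, s.2 ++ ("\n" ++ t.1 ++ " ")) := by simp [lpStep, h]

-- recursive description of B's consecutive grouping (proof helper only)
def lpGrp (k : Int) (ws : List String) : List (String × String × (String × Int)) → List (Int × List String)
  | [] => [(k, ws)]
  | t :: rest => if t.2.2.2 = k then lpGrp k (ws ++ [t.1]) rest
                 else (k, ws) :: lpGrp t.2.2.2 [t.1] rest

theorem lpGrp_ne_nil (l : List (String × String × (String × Int))) (k : Int) (ws : List String) :
    lpGrp k ws l ≠ [] := by
  induction l generalizing k ws with
  | nil => simp [lpGrp]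
  | cons t rest ih => by_cases h : t.2.2.2 = k <;> simp [lpGrp, h, ih]

theorem lpFoldB (l : List (String × String × (String × Int))) :
    ∀ (init : List (Int × List String)) (k : Int) (ws : List String),
      List.foldl lpGroupStep (init ++ [(k, ws)]) l = init ++ lpGrp k ws l := by
  induction l with
  | nil => intro init k ws; simp [lpGrp]
  | cons t rest ih =>
    intro init k ws
    by_cases h : k = t.2.2.2
    · have : List.foldl lpGroupStep (init ++ [(k, ws)]) (t :: rest)
          = List.foldl lpGroupStep (init ++ [(k, ws ++ [t.1])]) rest := by
        simp [List.foldl_cons, lpGroupStep, h]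
      rw [this, ih, lpGrp]
      simp [h.symm]
    · have : List.foldl lpGroupStep (init ++ [(k, ws)]) (t :: rest)
          = List.foldl lpGroupStep ((init ++ [(k, ws)]) ++ [(t.2.2.2, [t.1])]) rest := by
        simp [List.foldl_cons, lpGroupStep, h]
      rw [this, ih]
      have h' : t.2.2.2 ≠ k := fun hh => h hh.symm
      simp [lpGrp, h']
  
-- A's loop with an accumulated prefix: the prefix factors out
theorem lpShiftA (l : List (String × String × (String × Int))) :
    ∀ (c : Int) (s : String),
      ((l.foldl lpStep (c, s)).2).toList = s.toList ++ ((l.foldl lpStep (c, "")).2).toList := by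
  induction l with
  | nil => intro c s; simp
  | cons t rest ih =>
    intro c s
    by_cases h : t.2.2.2 = c
    · rw [List.foldl_cons, List.foldl_cons, lpStep_eq (c, s) t h, lpStep_eq (c, "") t h]
      rw [ih c (s ++ (t.1 ++ " ")), ih c ("" ++ (t.1 ++ " "))]
      simp
    · rw [List.foldl_cons, List.foldl_cons, lpStep_ne (c, s) t h, lpStep_ne (c, "") t h]
      rw [ih t.2.2.2 (s ++ ("\n" ++ t.1 ++ " ")), ih t.2.2.2 ("" ++ ("\n" ++ t.1 ++ " "))]
      simp
  
-- join with a trailing extra part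
theorem lpJoinConcat (sep p : List Char) (a : List Char) (ps : List (List Char)) :
    PySem.Chars.join sep ((a :: ps) ++ [p]) = PySem.Chars.join sep (a :: ps) ++ sep ++ p := by
  induction ps generalizing a with
  | nil => simp [PySem.Chars.join_cons_cons, PySem.Chars.join_singleton]
  | cons b rest ih =>
    have := ih b
    simp only [List.cons_append, PySem.Chars.join_cons_cons] at *
    simp [this, List.append_assoc]

-- rendering of B's groups as a character list
def lpRender (L : List (Int × List String)) : List Char :=
  PySem.Chars.join [' ', '\n'] (L.map (fun g => PySem.Chars.join [' '] (g.2.map String.toList)))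

theorem lpMain (l : List (String × String × (String × Int))) :
    ∀ (k : Int) (a : String) (ws : List String),
      lpRender (lpGrp k (a :: ws) l) ++ [' ']
        = PySem.Chars.join [' '] ((a :: ws).map String.toList) ++ [' ']
            ++ ((l.foldl lpStep (k, "")).2).toList := by
  induction l with
  | nil => intro k a ws; simp [lpGrp, lpRender, PySem.Chars.join_singleton]
  | cons t rest ih =>
    intro k a ws
    by_cases h : t.2.2.2 = k
    · have hgrp : lpGrp k (a :: ws) (t :: rest) = lpGrp k (a :: (ws ++ [t.1])) rest := by
        simp [lpGrp, h]
      have hstep : (List.foldl lpStep (k, "") (t :: rest)).2.toList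
          = t.1.toList ++ [' '] ++ ((rest.foldl lpStep (k, "")).2).toList := by
        rw [List.foldl_cons, lpStep_eq (k, "") t h, lpShiftA rest k ("" ++ (t.1 ++ " "))]
        simp
      rw [hgrp, ih k a (ws ++ [t.1]), hstep]
      have : PySem.Chars.join [' '] ((a :: (ws ++ [t.1])).map String.toList)
          = PySem.Chars.join [' '] ((a :: ws).map String.toList) ++ [' '] ++ t.1.toList := by
        have := lpJoinConcat [' '] t.1.toList a.toList (ws.map String.toList)
        simpa using this
      rw [this]; simp
    · have hgrp : lpGrp k (a :: ws) (t :: rest) = (k, a :: ws) :: lpGrp t.2.2.2 [t.1] rest := by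
        simp [lpGrp, h]
      obtain ⟨g, gs, hg⟩ : ∃ g gs, lpGrp t.2.2.2 [t.1] rest = g :: gs := by
        cases hgg : lpGrp t.2.2.2 [t.1] rest with
        | nil => exact absurd hgg (lpGrp_ne_nil rest _ _)
        | cons g gs => exact ⟨g, gs, rfl⟩
      have hrender : lpRender ((k, a :: ws) :: lpGrp t.2.2.2 [t.1] rest)
          = PySem.Chars.join [' '] ((a :: ws).map String.toList) ++ [' ', '\n']
              ++ lpRender (lpGrp t.2.2.2 [t.1] rest) := by
        rw [hg]; simp [lpRender, PySem.Chars.join_cons_cons]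
      have hstep : (List.foldl lpStep (k, "") (t :: rest)).2.toList
          = '\n' :: (t.1.toList ++ [' '] ++ ((rest.foldl lpStep (t.2.2.2, "")).2).toList) := by
        rw [List.foldl_cons, lpStep_ne (k, "") t h, lpShiftA rest t.2.2.2 ("" ++ ("\n" ++ t.1 ++ " "))]
        simp
      have hih := ih t.2.2.2 t.1 []
      simp only [List.map_cons, List.map_nil, PySem.Chars.join_singleton] at hih
      rw [hgrp, hrender, hstep]
      have : lpRender (lpGrp t.2.2.2 [t.1] rest) ++ [' ']
          = t.1.toList ++ [' '] ++ ((rest.foldl lpStep (t.2.2.2, "")).2).toList := by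
        simpa using hih
      calc PySem.Chars.join [' '] ((a :: ws).map String.toList) ++ [' ', '\n']
              ++ lpRender (lpGrp t.2.2.2 [t.1] rest) ++ [' ']
          = PySem.Chars.join [' '] ((a :: ws).map String.toList) ++ [' ', '\n']
              ++ (lpRender (lpGrp t.2.2.2 [t.1] rest) ++ [' ']) := by simp [List.append_assoc]
        _ = _ := by rw [this]; simp [List.append_assoc]

theorem lpStrip_concat_space (x : List Char) :
    PySem.Chars.strip (x ++ [' ']) = PySem.Chars.strip x := by
  simp only [PySem.Chars.strip, PySem.Chars.lstrip, PySem.Chars.rstrip]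
  rw [List.dropWhile_append]
  by_cases h : (List.dropWhile PySem.Chars.isspace x).isEmpty = true
  · rw [if_pos h]
    rw [List.isEmpty_iff.mp h]
    decide
  · rw [if_neg h]
    simp [List.reverse_append, show PySem.Chars.isspace ' ' = true by decide]

theorem lpStrip_cons_newline (x : List Char) :
    PySem.Chars.strip ('\n' :: x) = PySem.Chars.strip x := by
  simp [PySem.Chars.strip, PySem.Chars.lstrip, show PySem.Chars.isspace '\n' = true by decide]

-- ===== VERDICT (by name: the statement is the Claim_ definition above) =====
theorem line_print_spec : Claim_equal_line_print := by
  intro prediction _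
  unfold Spec_line_print
  cases prediction with
  | nil => rfl
  | cons t rest =>
    apply String.toList_inj.mp
    simp only [line_print, line_print_alt, PySem.Str.toList_strip]
    have hB : List.foldl lpGroupStep [] (t :: rest) = lpGrp t.2.2.2 [t.1] rest := by
      have : List.foldl lpGroupStep [] (t :: rest)
          = List.foldl lpGroupStep ([] ++ [(t.2.2.2, [t.1])]) rest := by
        simp [List.foldl_cons, lpGroupStep]
      rw [this, lpFoldB]; simp
    have hBrender : (PySem.Str.join " \n" ((List.foldl lpGroupStep [] (t :: rest)).map
        (fun g => PySem.Str.join " " g.2))).toList = lpRender (lpGrp t.2.2.2 [t.1] rest) := by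
      rw [hB]
      simp [PySem.Str.toList_join, lpRender, List.map_map, Function.comp_def]
    rw [hBrender]
    have hmain := lpMain rest t.2.2.2 t.1 []
    simp only [List.map_cons, List.map_nil, PySem.Chars.join_singleton] at hmain
    by_cases h : t.2.2.2 = 1
    · have hstep : (List.foldl lpStep (1, "") (t :: rest)).2.toList
          = lpRender (lpGrp t.2.2.2 [t.1] rest) ++ [' '] := by
        rw [List.foldl_cons, lpStep_eq (1, "") t h, lpShiftA rest 1 ("" ++ (t.1 ++ " "))]
        rw [hmain, h]; simp [List.append_assoc]
      rw [hstep, lpStrip_concat_space]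
    · have hstep : (List.foldl lpStep (1, "") (t :: rest)).2.toList
          = '\n' :: (lpRender (lpGrp t.2.2.2 [t.1] rest) ++ [' ']) := by
        rw [List.foldl_cons, lpStep_ne (1, "") t h, lpShiftA rest t.2.2.2 ("" ++ ("\n" ++ t.1 ++ " "))]
        rw [hmain]; simp [List.append_assoc]
      rw [hstep, lpStrip_cons_newline, lpStrip_concat_space]
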